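-- pv_equiv track=rewrite | github.com/chillbot-io/openlabels | scrubiq/pipeline/merger.py | is_valid_healthcare_facility
-- ===== SOURCE A (Python) =====
-- HEALTHCARE_FACILITY_KEYWORDS = frozenset([
--     # Facility types
--     "hospital", "medical", "clinic", "health", "healthcare",
--     "care", "center", "centre", "memorial", "general",
--     "regional", "community", "university", "teaching",
--     "children", "pediatric", "veterans", "va",
--     "rehabilitation", "rehab", "psychiatric", "behavioral",
--     "surgery", "surgical", "emergency", "urgent",
--     "oncology", "cancer", "cardiac", "heart",
--     "orthopedic", "dental", "eye", "vision",
--     "pharmacy", "lab", "laboratory", "diagnostic",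
--     "imaging", "radiology", "hospice", "nursing",
--     "assisted", "living", "senior", "elder",
--     "specialty",  # Catches "X Specialty Clinic"
--     # Common name patterns
--     "st.", "saint", "mount", "mt.",
--     "mercy", "providence", "good samaritan", "sacred heart",
--     "baptist", "methodist", "presbyterian", "lutheran", "adventist",
-- ])
--
-- KNOWN_HEALTH_SYSTEMS = frozenset([
--     "kaiser", "kaiser permanente",
--     "mayo", "mayo clinic",
--     "cleveland clinic",
--     "johns hopkins",
--     "mass general", "massachusetts general",
--     "cedars-sinai", "cedars sinai",
--     "mount sinai", "mt sinai",
--     "nyu langone",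
--     "scripps",
--     "geisinger",
--     "intermountain",
--     "ascension",
--     "hca",
--     "tenet",
--     "commonspirit",
--     "dignity health",
--     "sutter",
--     "banner",
--     "advocate",
--     "atrium",
--     "beaumont",
--     "spectrum",
--     "wellstar",
--     "northwell",
--     "ochsner",
--     "piedmont",
--     "sentara",
--     "christus",
--     "sharp",
--     "uchealth",
--     "ucsf",
--     "ucla health",
-- ])
--
-- _HEALTHCARE_AUTOMATON = None
--
-- def is_valid_healthcare_facility(text: str) -> bool:
--     """
--     Check if text looks like a healthcare facility name.
--
--     Uses Aho-Corasick automaton for O(n) matching when available,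
--     falls back to O(k*n) iteration otherwise.
--
--     Reduces false positives on generic company names while keeping
--     hospitals, clinics, and known health systems.
--     """
--     text_lower = text.lower()
--
--     # O(n) path with Aho-Corasick
--     if _HEALTHCARE_AUTOMATON is not None:
--         # iter() returns matches - we just need to know if any exist
--         for _ in _HEALTHCARE_AUTOMATON.iter(text_lower):
--             return True
--         return False
--
--     # O(k*n) fallback when ahocorasick not available
--     for system in KNOWN_HEALTH_SYSTEMS:
--         if system in text_lower:
--             return True
--     for keyword in HEALTHCARE_FACILITY_KEYWORDS:
--         if keyword in text_lower:
--             return True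
--     return False
-- ===== SOURCE B (Python) =====
-- # B: one position-driven scan of the lowered text (outer loop over text positions,
-- # keywords tried as prefixes there), with the combined keyword table kept as a single
-- # '|'-packed string split once at load time, instead of A's per-keyword substring scans.
-- _KEYWORD_TABLE = (
--     "kaiser|kaiser permanente|mayo|mayo clinic|cleveland clinic|johns hopkins|"
--     "mass general|massachusetts general|cedars-sinai|cedars sinai|mount sinai|"
--     "mt sinai|nyu langone|scripps|geisinger|intermountain|ascension|hca|tenet|"
--     "commonspirit|dignity health|sutter|banner|advocate|atrium|beaumont|spectrum|"
--     "wellstar|northwell|ochsner|piedmont|sentara|christus|sharp|uchealth|ucsf|"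
--     "ucla health|"
--     "hospital|medical|clinic|health|healthcare|care|center|centre|memorial|"
--     "general|regional|community|university|teaching|children|pediatric|veterans|"
--     "va|rehabilitation|rehab|psychiatric|behavioral|surgery|surgical|emergency|"
--     "urgent|oncology|cancer|cardiac|heart|orthopedic|dental|eye|vision|pharmacy|"
--     "lab|laboratory|diagnostic|imaging|radiology|hospice|nursing|assisted|living|"
--     "senior|elder|specialty|st.|saint|mount|mt.|mercy|providence|good samaritan|"
--     "sacred heart|baptist|methodist|presbyterian|lutheran|adventist"
-- ).split("|")
--
--
-- def is_valid_healthcare_facility(text: str) -> bool: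
--     t = text.lower()
--     for i in range(len(t)):
--         for kw in _KEYWORD_TABLE:
--             if t.startswith(kw, i):
--                 return True
--     return False
-- ===== Notes on version B (the rewrite author's own statement) =====
-- stated objective: alternative
-- what changed: A runs a separate substring search over the whole text for each of the ~97 keywords (two keyword-driven loops); B makes one position-driven scan of the lowered text, testing keywords only as prefixes anchored at each position, with the keyword table packed into a single string split once at load.
import Mathlib
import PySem

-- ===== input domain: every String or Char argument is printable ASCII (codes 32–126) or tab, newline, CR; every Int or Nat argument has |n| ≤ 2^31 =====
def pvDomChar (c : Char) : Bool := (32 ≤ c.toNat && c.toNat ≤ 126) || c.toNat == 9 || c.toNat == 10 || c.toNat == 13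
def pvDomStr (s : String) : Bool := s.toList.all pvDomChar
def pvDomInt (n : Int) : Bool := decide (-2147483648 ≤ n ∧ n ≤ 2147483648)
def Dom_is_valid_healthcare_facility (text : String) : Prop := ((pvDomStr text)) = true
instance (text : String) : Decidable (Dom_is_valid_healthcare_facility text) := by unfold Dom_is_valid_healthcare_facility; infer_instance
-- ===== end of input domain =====

-- B replaces A's per-keyword whole-text substring scans by one position-driven scan of the
-- lowered text, with the keyword table packed into a single string split once at load
-- (objective: alternative traversal, not measured faster).

-- ===== PORT A =====
-- the two frozensets as lists of their distinct elements, in source order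
-- (frozenset iteration order is unspecified, but A's result — "does any element occur?" —
-- does not depend on it)
def pvKeywords : List String := [
  "hospital", "medical", "clinic", "health", "healthcare", "care", "center", "centre",
  "memorial", "general", "regional", "community", "university", "teaching", "children",
  "pediatric", "veterans", "va", "rehabilitation", "rehab", "psychiatric", "behavioral",
  "surgery", "surgical", "emergency", "urgent", "oncology", "cancer", "cardiac", "heart",
  "orthopedic", "dental", "eye", "vision", "pharmacy", "lab", "laboratory", "diagnostic",
  "imaging", "radiology", "hospice", "nursing", "assisted", "living", "senior", "elder",
  "specialty", "st.", "saint", "mount", "mt.", "mercy", "providence", "good samaritan",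
  "sacred heart", "baptist", "methodist", "presbyterian", "lutheran", "adventist"]

def pvSystems : List String := [
  "kaiser", "kaiser permanente", "mayo", "mayo clinic", "cleveland clinic", "johns hopkins",
  "mass general", "massachusetts general", "cedars-sinai", "cedars sinai", "mount sinai",
  "mt sinai", "nyu langone", "scripps", "geisinger", "intermountain", "ascension", "hca",
  "tenet", "commonspirit", "dignity health", "sutter", "banner", "advocate", "atrium",
  "beaumont", "spectrum", "wellstar", "northwell", "ochsner", "piedmont", "sentara",
  "christus", "sharp", "uchealth", "ucsf", "ucla health"]

-- _HEALTHCARE_AUTOMATON is None in the given module, so A takes the fallback path: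
-- two for-loops with early return, transliterated as List.any
def is_valid_healthcare_facility (text : String) : Bool :=
  let text_lower := PySem.Str.lower text
  if pvSystems.any (fun system => PySem.Str.isIn system text_lower) then true
  else if pvKeywords.any (fun keyword => PySem.Str.isIn keyword text_lower) then true
  else false

-- ===== PORT B =====
-- _KEYWORD_TABLE: one '|'-packed literal, split once
def pvKwBlob : String :=
  "kaiser|kaiser permanente|mayo|mayo clinic|cleveland clinic|johns hopkins|mass general|massachusetts general|cedars-sinai|cedars sinai|mount sinai|mt sinai|nyu langone|scripps|geisinger|intermountain|ascension|hca|tenet|commonspirit|dignity health|sutter|banner|advocate|atrium|beaumont|spectrum|wellstar|northwell|ochsner|piedmont|sentara|christus|sharp|uchealth|ucsf|ucla health|hospital|medical|clinic|health|healthcare|care|center|centre|memorial|general|regional|community|university|teaching|children|pediatric|veterans|va|rehabilitation|rehab|psychiatric|behavioral|surgery|surgical|emergency|urgent|oncology|cancer|cardiac|heart|orthopedic|dental|eye|vision|pharmacy|lab|laboratory|diagnostic|imaging|radiology|hospice|nursing|assisted|living|senior|elder|specialty|st.|saint|mount|mt.|mercy|providence|good samaritan|sacred heart|baptist|methodist|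presbyterian|lutheran|adventist"

-- str.split("|") raises only for an empty separator, so split? is always `some` here;
-- getD [] merely unwraps that `some`
def pvKwTable : List String := (PySem.Str.split? pvKwBlob "|").getD []

-- for i in range(len(t)): for kw in _KEYWORD_TABLE: if t.startswith(kw, i): return True
-- t.startswith(kw, i) is exact as startswith on (t.drop i) since 0 ≤ i ≤ len t
def is_valid_healthcare_facility_alt (text : String) : Bool :=
  let t := PySem.Chars.lower text.toList
  (List.range t.length).any (fun i =>
    pvKwTable.any (fun kw => PySem.Chars.startswith (t.drop i) kw.toList))

-- ===== PRECONDITION & SPEC =====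
def Spec_is_valid_healthcare_facility (text : String) (out : Bool) : Prop := out = is_valid_healthcare_facility_alt text
instance (text : String) (out : Bool) : Decidable (Spec_is_valid_healthcare_facility text out) := by unfold Spec_is_valid_healthcare_facility; infer_instance

-- ===== CLAIM (what is proved, stated in full; the proofs are below) =====
def Claim_equal_is_valid_healthcare_facility : Prop := ∀ (text : String), Dom_is_valid_healthcare_facility text → Spec_is_valid_healthcare_facility text (is_valid_healthcare_facility text)

-- ===== LEMMAS AND PROOFS =====

-- the split-at-load table is exactly the two keyword lists concatenated
set_option maxRecDepth 65536 in
set_option maxHeartbeats 2000000 in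
lemma pv_table_eq : pvKwTable = pvSystems ++ pvKeywords := by decide

-- every keyword is nonempty
set_option maxRecDepth 8192 in
lemma pv_kw_ne_nil : ∀ kw ∈ pvSystems ++ pvKeywords, kw.toList ≠ [] := by decide

-- ===== VERDICT (by name: the statement is the Claim_ definition above) =====
theorem is_valid_healthcare_facility_spec : Claim_equal_is_valid_healthcare_facility := by
  intro text _
  unfold Spec_is_valid_healthcare_facility
  rw [Bool.eq_iff_iff]
  set t : List Char := PySem.Chars.lower text.toList with ht
  have hA : (is_valid_healthcare_facility text) = true
      ↔ (∃ kw ∈ pvSystems, kw.toList <:+: t) ∨ (∃ kw ∈ pvKeywords, kw.toList <:+: t) := by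
    unfold is_valid_healthcare_facility
    simp [PySem.Chars.isIn_iff_infix, ht]
  have hB : (is_valid_healthcare_facility_alt text) = true
      ↔ ∃ i < t.length, ∃ kw ∈ pvKwTable, kw.toList <+: t.drop i := by
    unfold is_valid_healthcare_facility_alt
    simp [List.any_eq_true, List.mem_range, PySem.Chars.startswith_iff, ht]
  have hTab : ∀ kw, kw ∈ pvKwTable ↔ kw ∈ pvSystems ∨ kw ∈ pvKeywords := by
    intro kw; rw [pv_table_eq, List.mem_append]
  rw [hA, hB]
  constructor
  · intro hor
    obtain ⟨kw, hmem, hinf⟩ : ∃ kw, (kw ∈ pvSystems ∨ kw ∈ pvKeywords) ∧ kw.toList <:+: t := by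
      rcases hor with ⟨kw, h, hi⟩ | ⟨kw, h, hi⟩
      · exact ⟨kw, Or.inl h, hi⟩
      · exact ⟨kw, Or.inr h, hi⟩
    obtain ⟨j, hpref⟩ := (PySem.Chars.exists_prefix_drop_iff_isIn kw.toList t).mpr
      ((PySem.Chars.isIn_iff_infix kw.toList t).mpr hinf)
    have hne := pv_kw_ne_nil kw (List.mem_append.mpr hmem)
    have hj : j < t.length := by
      by_contra hge
      rw [List.drop_eq_nil_of_le (Nat.le_of_not_lt hge)] at hpref
      exact hne (List.prefix_nil.mp hpref)
    exact ⟨j, hj, kw, (hTab kw).mpr hmem, hpref⟩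
  · rintro ⟨i, _, kw, hmem, hpref⟩
    have hinf : kw.toList <:+: t :=
      (PySem.Chars.isIn_iff_infix kw.toList t).mp
        ((PySem.Chars.exists_prefix_drop_iff_isIn kw.toList t).mp ⟨i, hpref⟩)
    rcases (hTab kw).mp hmem with h | h
    · exact Or.inl ⟨kw, h, hinf⟩
    · exact Or.inr ⟨kw, h, hinf⟩
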